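-- pv_equiv track=rewrite | github.com/Malaeu/chen_q3 | src/chen_pairs_test.py | get_chen_pairs
-- ===== SOURCE A (Python) =====
-- from typing import List, Tuple
--
-- def is_prime(n: int) -> bool:
--     """Проверка на простоту."""
--     if n < 2:
--         return False
--     if n == 2:
--         return True
--     if n % 2 == 0:
--         return False
--     for i in range(3, int(n**0.5) + 1, 2):
--         if n % i == 0:
--             return False
--     return True
--
-- def is_semiprime(n: int) -> bool:
--     """Проверка на полупростоту (n = p*q где p, q простые)."""
--     if n < 4:
--         return False
--     for p in range(2, int(n**0.5) + 1):
--         if n % p == 0: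
--             q = n // p
--             if is_prime(p) and is_prime(q):
--                 return True
--     return False
--
-- def get_chen_pairs(X: int) -> List[int]:
--     """Chen pairs до X: p prime, p+2 prime or semiprime."""
--     pairs = []
--     for p in range(3, X + 1):
--         if is_prime(p):
--             q = p + 2
--             if is_prime(q) or is_semiprime(q):
--                 pairs.append(p)
--     return pairs
-- ===== SOURCE B (Python) =====
-- def get_chen_pairs(X):
--     """Chen pairs до X: p prime, p+2 prime or semiprime."""
--     N = X + 2
--     spf = list(range(N + 1))          # spf[n] == n  <=>  no prime factor recorded yet
--     for i in range(2, N + 1):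
--         if spf[i] == i:               # i is prime
--             for j in range(i * i, N + 1, i):
--                 if spf[j] == j:
--                     spf[j] = i        # i is the smallest prime factor of j
--     def prime(n):
--         return n >= 2 and spf[n] == n
--     return [p for p in range(3, X + 1)
--             if prime(p) and (prime(p + 2) or prime((p + 2) // spf[p + 2]))]
-- ===== Notes on version B (the rewrite author's own statement) =====
-- stated objective: faster
-- what changed: A trial-divides every single number (a sqrt-n primality loop per p, plus a divisor scan with nested primality tests on p+2); B makes one sieve pass that tabulates the smallest prime factor of every n <= X+2, after which primality and the prime-or-semiprime test are O(1) table lookups.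
import Mathlib
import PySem

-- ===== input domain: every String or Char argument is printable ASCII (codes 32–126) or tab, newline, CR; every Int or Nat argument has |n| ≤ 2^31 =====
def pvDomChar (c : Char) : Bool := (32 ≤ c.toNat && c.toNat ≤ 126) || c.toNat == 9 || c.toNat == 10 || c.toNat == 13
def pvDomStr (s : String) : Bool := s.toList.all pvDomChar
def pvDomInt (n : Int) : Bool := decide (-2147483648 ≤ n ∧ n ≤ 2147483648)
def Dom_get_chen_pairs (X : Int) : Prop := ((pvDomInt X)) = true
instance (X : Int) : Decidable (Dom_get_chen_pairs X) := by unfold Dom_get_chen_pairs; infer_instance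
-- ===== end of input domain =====

-- B replaces A's per-number trial division (a √n primality loop for every p and a divisor scan with
-- nested primality tests for every p+2) by ONE sieve pass that tabulates the smallest prime factor
-- of every n ≤ X+2; primality and the prime-or-semiprime test are then table lookups. Objective: faster.

-- ===== PORT A =====
-- int(n**0.5): exact as the integer square root on the admitted domain (0 ≤ n ≤ 2^31 + 2 is far below
-- 2^53, where the float sqrt truncation int(n**0.5) agrees with Nat.sqrt)
def pyISqrt (n : Int) : Int := (Nat.sqrt n.toNat : Int)

def is_prime (n : Int) : Bool :=
  if n < 2 then false
  else if n == 2 then true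
  else if PySem.Int.mod n 2 == 0 then false
  else !((PySem.List.pyRange 3 (pyISqrt n + 1) 2).any (fun i => PySem.Int.mod n i == 0))

def is_semiprime (n : Int) : Bool :=
  if n < 4 then false
  else (PySem.List.pyRange 2 (pyISqrt n + 1) 1).any
    (fun p => PySem.Int.mod n p == 0 && (is_prime p && is_prime (PySem.Int.floordiv n p)))

def get_chen_pairs (X : Int) : List Int :=
  (PySem.List.pyRange 3 (X + 1) 1).foldl
    (fun pairs p =>
      if is_prime p && (is_prime (p + 2) || is_semiprime (p + 2)) then pairs ++ [p] else pairs)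
    []

-- ===== PORT B =====
-- Every spf[·] read/write in Source B has its index inside [0, len(spf)), so the total forms
-- pyGetD/pySetD are exact there (= Python's spf[j] / spf[j] = i).
-- inner loop body: 'if spf[j] == j: spf[j] = i'
def markStep (i : Int) (t : List Int) (j : Int) : List Int :=
  if PySem.List.pyGetD t j 0 == j then PySem.List.pySetD t j i else t

-- 'spf = list(range(N + 1))' then the double sieve loop of Source B
def chenSieve (N : Int) : List Int :=
  (PySem.List.pyRange 2 (N + 1) 1).foldl
    (fun spf i =>
      if PySem.List.pyGetD spf i 0 == i then
        (PySem.List.pyRange (i * i) (N + 1) i).foldl (markStep i) spf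
      else spf)
    (PySem.List.pyRange 0 (N + 1) 1)

-- nested 'def prime(n): return n >= 2 and spf[n] == n'
def primeT (spf : List Int) (n : Int) : Bool :=
  decide (2 ≤ n) && (PySem.List.pyGetD spf n 0 == n)

def get_chen_pairs_alt (X : Int) : List Int :=
  let spf := chenSieve (X + 2)
  (PySem.List.pyRange 3 (X + 1) 1).filter
    (fun p => primeT spf p &&
      (primeT spf (p + 2) ||
        primeT spf (PySem.Int.floordiv (p + 2) (PySem.List.pyGetD spf (p + 2) 0))))

-- ===== PRECONDITION & SPEC =====
def Spec_get_chen_pairs (X : Int) (out : List Int) : Prop := out = get_chen_pairs_alt X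
instance (X : Int) (out : List Int) : Decidable (Spec_get_chen_pairs X out) := by unfold Spec_get_chen_pairs; infer_instance

-- ===== CLAIM (what is proved, stated in full; the proofs are below) =====
def Claim_equal_get_chen_pairs : Prop := ∀ (X : Int), Dom_get_chen_pairs X → Spec_get_chen_pairs X (get_chen_pairs X)

-- ===== LEMMAS AND PROOFS =====

-- ---- A-side characterizations (trial division ↔ Nat.Prime / minFac) ----
theorem is_prime_iff (n : Int) : is_prime n = true ↔ Nat.Prime n.toNat := by
  unfold is_prime
  split_ifs with h1 h2 h3
  · simp only [false_iff]
    intro hp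
    have := hp.two_le
    omega
  · have hn2 : n = 2 := by simpa using h2
    subst hn2
    simp only [true_iff]
    exact Nat.prime_two
  · have hn2 : n ≠ 2 := by simpa using h2
    have hdvd : (2:Int) ∣ n := (PySem.Int.mod_eq_zero_iff_dvd n 2).mp (by simpa using h3)
    simp only [false_iff]
    intro hp
    have h2d : 2 ∣ n.toNat := by
      rw [← Int.natCast_dvd_natCast]
      rwa [Int.toNat_of_nonneg (by omega)]
    rcases hp.eq_one_or_self_of_dvd 2 h2d with h | h <;> omega
  · have hn2 : n ≠ 2 := by simpa using h2
    have hn3 : 3 ≤ n := by omega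
    have hodd : ¬ (2:Int) ∣ n := by
      intro hd
      exact h3 (by simp [hd])
    have hnt : ((n.toNat : ℕ) : Int) = n := Int.toNat_of_nonneg (by omega)
    simp only [pyISqrt, Bool.not_eq_true', List.any_eq_false]
    constructor
    · intro h
      rw [Nat.prime_def_le_sqrt]
      refine ⟨by omega, fun m hm2 hmsq hmdvd => ?_⟩
      have hmd : (m : Int) ∣ n := by
        rw [← hnt]
        exact_mod_cast hmdvd
      by_cases h2m : 2 ∣ m
      · exact hodd (dvd_trans (by exact_mod_cast h2m) hmd)
      · have hm3 : 3 ≤ m := by omega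
        have hmem : (m : Int) ∈ PySem.List.pyRange 3 ((Nat.sqrt n.toNat : Int) + 1) 2 := by
          rw [PySem.List.mem_pyRange_iff_of_pos (by norm_num)]
          refine ⟨by exact_mod_cast hm3, ?_, ?_⟩ <;> omega
        exact h (m : Int) hmem (by simp [PySem.Int.mod_eq_zero_iff_dvd, hmd])
    · intro hp i hi
      rw [PySem.List.mem_pyRange_iff_of_pos (by norm_num)] at hi
      obtain ⟨hi3, hilt, -⟩ := hi
      simp only [beq_iff_eq, PySem.Int.mod_eq_zero_iff_dvd]
      intro hid
      have hnd : i.toNat ∣ n.toNat := by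
        rw [← Int.natCast_dvd_natCast]
        rw [Int.toNat_of_nonneg (by omega), hnt]
        exact hid
      exact (Nat.prime_def_le_sqrt.mp hp).2 i.toNat (by omega) (by omega) hnd

-- Nat-level core: a semiprime witness below the square root exists iff the cofactor of the
-- smallest prime factor is prime.
theorem semi_core (t : ℕ) (ht : 4 ≤ t) :
    (∃ m, 2 ≤ m ∧ m ≤ t.sqrt ∧ m ∣ t ∧ Nat.Prime m ∧ Nat.Prime (t / m)) ↔
      Nat.Prime (t / t.minFac) := by
  have hsp : Nat.Prime t.minFac := Nat.minFac_prime (by omega)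
  constructor
  · rintro ⟨m, hm2, hmsq, hmdvd, hpm, hpc⟩
    have hmc : m * (t / m) = t := Nat.mul_div_cancel' hmdvd
    have hmle : m ≤ t / m := by
      have h1 : m * m ≤ t := Nat.le_sqrt.mp hmsq
      rw [← hmc] at h1
      exact Nat.le_of_mul_le_mul_left h1 (by omega)
    have hsle : t.minFac ≤ m := Nat.minFac_le_of_dvd hm2 hmdvd
    have hsd : t.minFac ∣ m * (t / m) := by rw [hmc]; exact Nat.minFac_dvd t
    rcases (Nat.Prime.dvd_mul hsp).mp hsd with h | h
    · rw [(Nat.prime_dvd_prime_iff_eq hsp hpm).mp h]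
      exact hpc
    · have h1 : t.minFac = t / m := (Nat.prime_dvd_prime_iff_eq hsp hpc).mp h
      have h2 : m = t.minFac := le_antisymm (h1 ▸ hmle) hsle
      rw [← h2]
      exact hpc
  · intro hp
    have hnp : ¬ t.Prime := by
      intro htp
      rw [(Nat.prime_def_minFac.mp htp).2, Nat.div_self (by omega)] at hp
      exact Nat.not_prime_one hp
    have hsq : t.minFac * t.minFac ≤ t := by
      have := Nat.minFac_sq_le_self (by omega) hnp
      rwa [pow_two] at this
    exact ⟨t.minFac, hsp.two_le, Nat.le_sqrt.mpr hsq, Nat.minFac_dvd t, hsp, hp⟩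

theorem is_semiprime_iff (n : Int) (hn : 4 ≤ n) :
    is_semiprime n = true ↔ Nat.Prime (n.toNat / n.toNat.minFac) := by
  have hnt : ((n.toNat : ℕ) : Int) = n := Int.toNat_of_nonneg (by omega)
  unfold is_semiprime
  rw [if_neg (by omega), List.any_eq_true, ← semi_core n.toNat (by omega)]
  constructor
  · rintro ⟨i, hi, hf⟩
    rw [PySem.List.mem_pyRange_one] at hi
    simp only [pyISqrt] at hi
    simp only [Bool.and_eq_true, beq_iff_eq, PySem.Int.mod_eq_zero_iff_dvd] at hf
    obtain ⟨hid, hpi, hpq⟩ := hf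
    have hidn : i.toNat ∣ n.toNat := by
      rw [← Int.natCast_dvd_natCast]
      rw [Int.toNat_of_nonneg (by omega), hnt]
      exact hid
    have hq : PySem.Int.floordiv n i = ((n.toNat / i.toNat : ℕ) : Int) := by
      conv_lhs => rw [← hnt, ← Int.toNat_of_nonneg (show (0:Int) ≤ i by omega)]
      exact PySem.Int.floordiv_natCast _ _
    refine ⟨i.toNat, by omega, by omega, hidn, (is_prime_iff i).mp hpi, ?_⟩
    have := (is_prime_iff _).mp hpq
    rwa [hq, Int.toNat_natCast] at this
  · rintro ⟨m, hm2, hmsq, hmdvd, hpm, hpc⟩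
    refine ⟨(m : Int), ?_, ?_⟩
    · rw [PySem.List.mem_pyRange_one]
      simp only [pyISqrt]
      omega
    · have hq : PySem.Int.floordiv n (m : Int) = ((n.toNat / m : ℕ) : Int) := by
        conv_lhs => rw [← hnt]
        exact PySem.Int.floordiv_natCast _ _
      simp only [Bool.and_eq_true, beq_iff_eq, PySem.Int.mod_eq_zero_iff_dvd]
      refine ⟨?_, ?_, ?_⟩
      · rw [← hnt]
        exact_mod_cast hmdvd
      · rw [is_prime_iff, Int.toNat_natCast]
        exact hpm
      · rw [hq, is_prime_iff, Int.toNat_natCast]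
        exact hpc

-- ---- B-side: the sieve tabulates the smallest prime factor ----

-- pySetD changes exactly one entry (Int-index version of pyGetD_pySetD_natCast).
theorem getD_setD (t : List Int) (j n v : Int) (hj : 0 ≤ j) (hjl : j < (t.length : Int))
    (hn : 0 ≤ n) :
    PySem.List.pyGetD (PySem.List.pySetD t j v) n 0 = if n = j then v else PySem.List.pyGetD t n 0 := by
  have hj' : j = ((j.toNat : ℕ) : Int) := by omega
  have hn' : n = ((n.toNat : ℕ) : Int) := by omega
  rw [hj', hn', PySem.List.pyGetD_pySetD_natCast t j.toNat n.toNat v 0 (by omega)]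
  by_cases h : n.toNat = j.toNat
  · rw [if_pos h, if_pos (by omega)]
  · rw [if_neg h, if_neg (by omega)]

theorem length_foldl_mark (i : Int) (L : List Int) (t : List Int) :
    (L.foldl (markStep i) t).length = t.length := by
  induction L generalizing t with
  | nil => rfl
  | cons j L ih =>
      simp only [List.foldl_cons, markStep]
      split_ifs with h
      · rw [ih, PySem.List.length_pySetD]
      · exact ih t

-- pyRange with a positive step has no duplicate elements.
theorem nodup_pyRange_pos (a b s : Int) (hs : 0 < s) : (PySem.List.pyRange a b s).Nodup := by
  rw [PySem.List.pyRange_of_pos a b hs]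
  refine List.Nodup.map ?_ List.nodup_range
  intro x y hxy
  simp only at hxy
  have hsx : s * (x : Int) = s * y := by linarith
  exact_mod_cast mul_left_cancel₀ (by omega : s ≠ 0) hsx

-- The inner loop: over a Nodup list of in-range indices, each listed entry still equal to its
-- index gets overwritten with i; everything else is untouched.
theorem foldl_mark_getD (i : Int) (L : List Int) (t : List Int) (hnd : L.Nodup)
    (hL : ∀ j ∈ L, 0 ≤ j ∧ j < (t.length : Int)) (n : Int) (hn : 0 ≤ n) :
    PySem.List.pyGetD (L.foldl (markStep i) t) n 0 =
      if n ∈ L ∧ PySem.List.pyGetD t n 0 = n then i else PySem.List.pyGetD t n 0 := by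
  induction L generalizing t with
  | nil => simp
  | cons j L ih =>
      obtain ⟨hj0, hjl⟩ := hL j (by simp)
      have hjL : j ∉ L := hnd.notMem
      simp only [List.foldl_cons]
      have hstep_len : (markStep i t j).length = t.length := by
        simp only [markStep]
        split_ifs with h
        · exact PySem.List.length_pySetD t j i
        · rfl
      have hstep : ∀ m : Int, 0 ≤ m → PySem.List.pyGetD (markStep i t j) m 0 =
          if m = j ∧ PySem.List.pyGetD t j 0 = j then i else PySem.List.pyGetD t m 0 := by
        intro m hm
        simp only [markStep]
        by_cases h : PySem.List.pyGetD t j 0 = j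
        · rw [if_pos (by simpa using h), getD_setD t j m i hj0 hjl hm]
          by_cases hmj : m = j
          · rw [if_pos hmj, if_pos ⟨hmj, h⟩]
          · rw [if_neg hmj, if_neg (fun hc => hmj hc.1)]
        · rw [if_neg (by simpa using h), if_neg (fun hc => h hc.2)]
      rw [ih (markStep i t j) hnd.of_cons
          (fun m hm => by rw [hstep_len]; exact hL m (List.mem_cons_of_mem j hm))]
      rw [hstep n hn]
      by_cases hnj : n = j
      · subst hnj
        by_cases ha : PySem.List.pyGetD t n 0 = n <;> simp [ha, hjL]
      · simp [hnj]

-- The value of table entry n after the outer loop has processed i = 2 .. k: the smallest prime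
-- factor once recorded (composite n whose minFac has been reached), otherwise still n.
def pvVal (k n : Int) : Int :=
  if 2 ≤ n ∧ ¬ n.toNat.Prime ∧ (n.toNat.minFac : Int) ≤ k then (n.toNat.minFac : Int) else n

theorem pvVal_one (n : Int) : pvVal 1 n = n := by
  unfold pvVal
  rw [if_neg]
  rintro ⟨h2, hp, hle⟩
  have := (Nat.minFac_prime (show n.toNat ≠ 1 by omega)).two_le
  omega

theorem pvVal_eq_self_iff (k n : Int) (h2 : 2 ≤ n) (hk : n ≤ k + 1) :
    pvVal k n = n ↔ n.toNat.Prime := by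
  unfold pvVal
  constructor
  · intro h
    by_contra hp
    have hmf := Nat.minFac_le (show 0 < n.toNat by omega)
    have hne : n.toNat.minFac ≠ n.toNat := fun he =>
      hp (Nat.prime_def_minFac.mpr ⟨by omega, he⟩)
    rw [if_pos ⟨h2, hp, by omega⟩] at h
    omega
  · intro hp
    rw [if_neg (fun hc => hc.2.1 hp)]

-- The outer loop invariant: after processing i = 2 .. k the table holds pvVal k.
theorem sieve_inv (N : Int) (hN : 0 ≤ N) :
    ∀ k : Int, 1 ≤ k → k ≤ N →
      (((PySem.List.pyRange 2 (k + 1) 1).foldl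
          (fun spf i =>
            if PySem.List.pyGetD spf i 0 == i then
              (PySem.List.pyRange (i * i) (N + 1) i).foldl (markStep i) spf
            else spf)
          (PySem.List.pyRange 0 (N + 1) 1)).length = (N + 1).toNat ∧
       ∀ n : Int, 0 ≤ n → n ≤ N →
         PySem.List.pyGetD
           ((PySem.List.pyRange 2 (k + 1) 1).foldl
             (fun spf i =>
               if PySem.List.pyGetD spf i 0 == i then
                 (PySem.List.pyRange (i * i) (N + 1) i).foldl (markStep i) spf
               else spf)
             (PySem.List.pyRange 0 (N + 1) 1)) n 0 = pvVal k n) := by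
  intro k hk
  induction k, hk using Int.le_induction with
  | base =>
      intro _
      rw [show PySem.List.pyRange 2 (1 + 1) 1 = [] from PySem.List.pyRange_one_eq_nil (by omega)]
      simp only [List.foldl_nil]
      have hlen : (PySem.List.pyRange 0 (N + 1) 1).length = (N + 1).toNat := by
        rw [PySem.List.length_pyRange_one]
        norm_num
      refine ⟨hlen, fun n hn hnN => ?_⟩
      rw [pvVal_one n]
      rw [PySem.List.pyGetD_eq_getElem _ _ hn (by rw [hlen]; omega)]
      rw [PySem.List.getElem_pyRange_one]
      omega
  | succ k hk1 ih =>
      intro hkN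
      obtain ⟨ihlen, ihval⟩ := ih (by omega)
      rw [show PySem.List.pyRange 2 (k + 1 + 1) 1 = PySem.List.pyRange 2 (k + 1) 1 ++ [k + 1] from
        PySem.List.pyRange_one_succ_right (by omega), List.foldl_append]
      set T := (PySem.List.pyRange 2 (k + 1) 1).foldl
          (fun spf i =>
            if PySem.List.pyGetD spf i 0 == i then
              (PySem.List.pyRange (i * i) (N + 1) i).foldl (markStep i) spf
            else spf)
          (PySem.List.pyRange 0 (N + 1) 1) with hT
      simp only [List.foldl_cons, List.foldl_nil]
      have hTi : PySem.List.pyGetD T (k + 1) 0 = pvVal k (k + 1) :=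
        ihval (k + 1) (by omega) (by omega)
      by_cases hp : (k + 1).toNat.Prime
      · -- k+1 is prime: the guard holds and the inner loop records minFac = k+1
        have hguard : (PySem.List.pyGetD T (k + 1) 0 == k + 1) = true := by
          rw [hTi, (pvVal_eq_self_iff k (k + 1) (by omega) (by omega)).mpr hp]
          simp
        rw [if_pos hguard]
        have hnd := nodup_pyRange_pos ((k + 1) * (k + 1)) (N + 1) (k + 1) (by omega)
        have hbounds : ∀ j ∈ PySem.List.pyRange ((k + 1) * (k + 1)) (N + 1) (k + 1),
            0 ≤ j ∧ j < (T.length : Int) := by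
          intro j hj
          rw [PySem.List.mem_pyRange_iff_of_pos (by omega)] at hj
          rw [ihlen]
          constructor <;> [nlinarith [hj.1]; omega]
        constructor
        · rw [length_foldl_mark, ihlen]
        · intro n hn hnN
          rw [foldl_mark_getD (k + 1) _ T hnd hbounds n hn, ihval n hn hnN]
          by_cases hc : n ∈ PySem.List.pyRange ((k + 1) * (k + 1)) (N + 1) (k + 1) ∧ pvVal k n = n
          · rw [if_pos hc]
            obtain ⟨hmem, hself⟩ := hc
            rw [PySem.List.mem_pyRange_iff_of_pos (by omega)] at hmem
            obtain ⟨hlo, hhi, hdvd⟩ := hmem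
            have hdn : (k + 1) ∣ n := by
              simpa using dvd_add hdvd (dvd_mul_right (k + 1) (k + 1))
            have hdnN : (k + 1).toNat ∣ n.toNat := by
              rw [← Int.natCast_dvd_natCast]
              rw [Int.toNat_of_nonneg (by omega), Int.toNat_of_nonneg hn]
              exact hdn
            have hlt : k + 1 < n := by nlinarith
            have hnp : ¬ n.toNat.Prime := by
              intro hpn
              rcases hpn.eq_one_or_self_of_dvd _ hdnN with h | h <;> omega
            have hn2 : 2 ≤ n := by nlinarith
            have hmfle : n.toNat.minFac ≤ (k + 1).toNat :=
              Nat.minFac_le_of_dvd (by omega) hdnN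
            have hself' : ¬ ((n.toNat.minFac : Int) ≤ k) := by
              intro hle
              unfold pvVal at hself
              rw [if_pos ⟨hn2, hnp, hle⟩] at hself
              have := (Nat.minFac_prime (show n.toNat ≠ 1 by omega)).two_le
              omega
            unfold pvVal
            rw [if_pos ⟨hn2, hnp, by omega⟩]
            omega
          · rw [if_neg hc]
            -- pvVal only changes at k+1 for composites whose minFac is exactly k+1,
            -- and those are all in the marked range with table entry still = index.
            by_cases hd : 2 ≤ n ∧ ¬ n.toNat.Prime ∧ (n.toNat.minFac : Int) = k + 1
            · exfalso
              obtain ⟨hn2, hnp, hmf⟩ := hd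
              apply hc
              have hmfd : n.toNat.minFac ∣ n.toNat := Nat.minFac_dvd n.toNat
              have hdn : (k + 1) ∣ n := by
                rw [← hmf]
                have h0 : (n.toNat.minFac : Int) ∣ (n.toNat : Int) :=
                  Int.natCast_dvd_natCast.mpr hmfd
                rwa [Int.toNat_of_nonneg hn] at h0
              have hsq : n.toNat.minFac * n.toNat.minFac ≤ n.toNat := by
                have := Nat.minFac_sq_le_self (show 0 < n.toNat by omega) hnp
                rwa [pow_two] at this
              have hsq' : (k + 1) * (k + 1) ≤ n := by
                have : ((n.toNat.minFac * n.toNat.minFac : ℕ) : Int) ≤ ((n.toNat : ℕ) : Int) :=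
                  by exact_mod_cast hsq
                push_cast at this
                rw [hmf] at this
                omega
              refine ⟨?_, ?_⟩
              · rw [PySem.List.mem_pyRange_iff_of_pos (by omega)]
                exact ⟨hsq', by omega, dvd_sub hdn (dvd_mul_right (k + 1) (k + 1))⟩
              · unfold pvVal
                rw [if_neg (fun hcc => by omega)]
            · unfold pvVal
              by_cases hc1 : 2 ≤ n ∧ ¬ n.toNat.Prime ∧ (n.toNat.minFac : Int) ≤ k
              · rw [if_pos hc1, if_pos (show 2 ≤ n ∧ ¬ n.toNat.Prime ∧
                  (n.toNat.minFac : Int) ≤ k + 1 from ⟨hc1.1, hc1.2.1, by omega⟩)]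
              · have hc2 : ¬ (2 ≤ n ∧ ¬ n.toNat.Prime ∧ (n.toNat.minFac : Int) ≤ k + 1) := by
                  rintro ⟨h1, h2, h3⟩
                  by_cases he : (n.toNat.minFac : Int) ≤ k
                  · exact hc1 ⟨h1, h2, he⟩
                  · exact hd ⟨h1, h2, by omega⟩
                rw [if_neg hc1, if_neg hc2]
      · -- k+1 is not prime: the guard fails and pvVal is unchanged
        have hguard : (PySem.List.pyGetD T (k + 1) 0 == k + 1) = false := by
          rw [hTi]
          simp only [beq_eq_false_iff_ne, ne_eq]
          exact fun h => hp ((pvVal_eq_self_iff k (k + 1) (by omega) (by omega)).mp h)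
        rw [if_neg (by simp [hguard])]
        refine ⟨ihlen, fun n hn hnN => ?_⟩
        rw [ihval n hn hnN]
        unfold pvVal
        by_cases hc1 : 2 ≤ n ∧ ¬ n.toNat.Prime ∧ (n.toNat.minFac : Int) ≤ k
        · rw [if_pos hc1, if_pos (show 2 ≤ n ∧ ¬ n.toNat.Prime ∧
            (n.toNat.minFac : Int) ≤ k + 1 from ⟨hc1.1, hc1.2.1, by omega⟩)]
        · have hc2 : ¬ (2 ≤ n ∧ ¬ n.toNat.Prime ∧ (n.toNat.minFac : Int) ≤ k + 1) := by
            rintro ⟨h1, h2, h3⟩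
            have hmp : n.toNat.minFac.Prime := Nat.minFac_prime (show n.toNat ≠ 1 by omega)
            by_cases he : (n.toNat.minFac : Int) ≤ k
            · exact hc1 ⟨h1, h2, he⟩
            · have heq : n.toNat.minFac = (k + 1).toNat := by omega
              exact hp (heq ▸ hmp)
          rw [if_neg hc1, if_neg hc2]

-- Final table: entry n is the smallest prime factor of n (for 2 ≤ n ≤ N).
theorem chenSieve_getD (N n : Int) (hN : 1 ≤ N) (hn2 : 2 ≤ n) (hnN : n ≤ N) :
    PySem.List.pyGetD (chenSieve N) n 0 = (n.toNat.minFac : Int) := by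
  unfold chenSieve
  rw [(sieve_inv N (by omega) N (by omega) le_rfl).2 n (by omega) hnN]
  unfold pvVal
  by_cases hp : n.toNat.Prime
  · rw [if_neg (fun hc => hc.2.1 hp)]
    have := (Nat.prime_def_minFac.mp hp).2
    omega
  · have hle : n.toNat.minFac ≤ n.toNat := Nat.minFac_le (by omega)
    rw [if_pos ⟨hn2, hp, by omega⟩]

-- B's table-lookup primality test.
theorem primeT_iff (N n : Int) (hN : 1 ≤ N) (hn : 0 ≤ n) (hnN : n ≤ N) :
    primeT (chenSieve N) n = true ↔ Nat.Prime n.toNat := by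
  unfold primeT
  by_cases h2 : 2 ≤ n
  · rw [chenSieve_getD N n hN h2 hnN]
    simp only [h2, decide_true, Bool.true_and, beq_iff_eq]
    rw [Nat.prime_def_minFac]
    omega
  · simp only [h2, decide_false, Bool.false_and]
    constructor
    · intro h
      simp at h
    · intro hpn
      have := hpn.two_le
      omega

-- ===== VERDICT (by name: the statement is the Claim_ definition above) =====
theorem get_chen_pairs_spec : Claim_equal_get_chen_pairs := by
  intro X _hX
  show get_chen_pairs X = get_chen_pairs_alt X
  unfold get_chen_pairs get_chen_pairs_alt
  rw [PySem.List.foldl_append_if_eq_filter, List.nil_append]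
  refine List.filter_congr fun p hp => ?_
  rw [PySem.List.mem_pyRange_one] at hp
  obtain ⟨hp3, hpX⟩ := hp
  have hN : (1 : Int) ≤ X + 2 := by omega
  have hmf : PySem.List.pyGetD (chenSieve (X + 2)) (p + 2) 0 = ((p + 2).toNat.minFac : Int) :=
    chenSieve_getD (X + 2) (p + 2) hN (by omega) (by omega)
  have hA : is_prime p = primeT (chenSieve (X + 2)) p :=
    Bool.eq_iff_iff.mpr ((is_prime_iff p).trans (primeT_iff (X + 2) p hN (by omega) (by omega)).symm)
  have hB : is_prime (p + 2) = primeT (chenSieve (X + 2)) (p + 2) :=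
    Bool.eq_iff_iff.mpr ((is_prime_iff (p + 2)).trans
      (primeT_iff (X + 2) (p + 2) hN (by omega) (by omega)).symm)
  have hq : PySem.Int.floordiv (p + 2) (PySem.List.pyGetD (chenSieve (X + 2)) (p + 2) 0)
      = (((p + 2).toNat / (p + 2).toNat.minFac : ℕ) : Int) := by
    rw [hmf]
    conv_lhs => rw [show p + 2 = (((p + 2).toNat : ℕ) : Int) by omega]
    exact PySem.Int.floordiv_natCast _ _
  have hC : is_semiprime (p + 2) =
      primeT (chenSieve (X + 2)) (PySem.Int.floordiv (p + 2) (PySem.List.pyGetD (chenSieve (X + 2)) (p + 2) 0)) := by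
    refine Bool.eq_iff_iff.mpr ((is_semiprime_iff (p + 2) (by omega)).trans ?_)
    rw [hq]
    have hle : ((p + 2).toNat / (p + 2).toNat.minFac : ℕ) ≤ (p + 2).toNat := Nat.div_le_self _ _
    have hub : ((((p + 2).toNat / (p + 2).toNat.minFac : ℕ)) : Int) ≤ X + 2 := by
      calc ((((p + 2).toNat / (p + 2).toNat.minFac : ℕ)) : Int) ≤ ((p + 2).toNat : Int) := by
            exact_mod_cast hle
        _ ≤ X + 2 := by omega
    rw [primeT_iff (X + 2) _ hN (Int.natCast_nonneg _) hub, Int.toNat_natCast]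
  rw [hA, hB, hC]
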